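-- pv_equiv track=rewrite | github.com/beltenebror/python-exercises | UMC2/main.py | suma2mayores
-- ===== SOURCE A (Python) =====
-- def suma2mayores(n1, n2, n3, n4):
--     numeros = [n1, n2, n3, n4]
--     max1 = numeros[0]
--     for numero in numeros:
--         if numero > max1:
--             max1 = numero
--     numeros.remove(max1)
--     max2 = numeros[0]
--     for numero in numeros:
--         if numero > max2:
--             max2 = numero
--     return max1 + max2
-- ===== SOURCE B (Python) =====
-- def suma2mayores(n1, n2, n3, n4):
--     return sum(sorted([n1, n2, n3, n4])[-2:])
-- ===== Notes on version B (the rewrite author's own statement) =====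
-- stated objective: simpler
-- what changed: Replaces the two repeated max-scans plus a list.remove with a single sort followed by a slice of the two largest and a sum.
import Mathlib
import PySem

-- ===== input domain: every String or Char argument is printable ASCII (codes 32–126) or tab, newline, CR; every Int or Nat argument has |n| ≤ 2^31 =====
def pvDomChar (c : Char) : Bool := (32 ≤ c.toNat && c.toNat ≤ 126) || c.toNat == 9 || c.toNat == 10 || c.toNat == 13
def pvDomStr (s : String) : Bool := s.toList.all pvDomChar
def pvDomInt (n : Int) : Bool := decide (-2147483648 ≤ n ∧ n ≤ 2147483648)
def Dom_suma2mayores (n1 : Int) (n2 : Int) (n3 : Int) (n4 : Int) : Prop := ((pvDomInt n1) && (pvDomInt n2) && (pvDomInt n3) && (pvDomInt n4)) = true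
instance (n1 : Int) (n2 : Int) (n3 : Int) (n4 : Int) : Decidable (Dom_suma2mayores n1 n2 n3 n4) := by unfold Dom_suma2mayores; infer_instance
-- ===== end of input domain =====

-- B replaces A's two max-scans plus list.remove with one sort and a sum of the top-two slice (objective: simpler).

-- ===== PORT A =====
-- literal port: build the list, scan for the max, remove its first occurrence, scan the rest for the max
def suma2mayores (n1 : Int) (n2 : Int) (n3 : Int) (n4 : Int) : Int :=
  let numeros : List Int := [n1, n2, n3, n4]
  let max1 := numeros.foldl (fun m numero => if numero > m then numero else m)
    (PySem.List.pyGetD numeros 0 0)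
  let numeros2 := (PySem.List.remove? numeros max1).getD []   -- remove? is some: max1 ∈ numeros
  let max2 := numeros2.foldl (fun m numero => if numero > m then numero else m)
    (PySem.List.pyGetD numeros2 0 0)
  max1 + max2

-- ===== PORT B =====
-- literal port of Source B: sum(sorted([n1, n2, n3, n4])[-2:])
def suma2mayores_alt (n1 : Int) (n2 : Int) (n3 : Int) (n4 : Int) : Int :=
  (PySem.List.slice (PySem.List.sorted [n1, n2, n3, n4] (fun x => x) false)
    (some (-2)) none).sum

-- ===== PRECONDITION & SPEC =====
def Spec_suma2mayores (n1 : Int) (n2 : Int) (n3 : Int) (n4 : Int) (out : Int) : Prop := out = suma2mayores_alt n1 n2 n3 n4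
instance (n1 : Int) (n2 : Int) (n3 : Int) (n4 : Int) (out : Int) : Decidable (Spec_suma2mayores n1 n2 n3 n4 out) := by unfold Spec_suma2mayores; infer_instance

-- ===== CLAIM (what is proved, stated in full; the proofs are below) =====
def Claim_equal_suma2mayores : Prop := ∀ (n1 : Int) (n2 : Int) (n3 : Int) (n4 : Int), Dom_suma2mayores n1 n2 n3 n4 → Spec_suma2mayores n1 n2 n3 n4 (suma2mayores n1 n2 n3 n4)

-- ===== LEMMAS AND PROOFS =====

-- the max-scan loop of A: its result is in m :: xs and bounds every element of m :: xs
theorem foldMax_spec (m : Int) (xs : List Int) :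
    (xs.foldl (fun m numero => if numero > m then numero else m) m ∈ m :: xs) ∧
    (∀ y ∈ m :: xs, y ≤ xs.foldl (fun m numero => if numero > m then numero else m) m) := by
  induction xs generalizing m with
  | nil => simp
  | cons x t ih =>
    simp only [List.foldl_cons]
    by_cases hx : x > m
    · simp only [if_pos hx]
      rcases ih x with ⟨h1, h2⟩
      constructor
      · rcases List.mem_cons.mp h1 with h | h
        · simp [h]
        · simp [h]
      · intro y hy
        rcases List.mem_cons.mp hy with h | h
        · have := h2 x (List.mem_cons_self ..)
          omega
        · exact h2 y (by simpa using h)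
    · simp only [if_neg hx]
      rcases ih m with ⟨h1, h2⟩
      constructor
      · rcases List.mem_cons.mp h1 with h | h
        · simp [h]
        · simp [h]
      · intro y hy
        rcases List.mem_cons.mp hy with h | h
        · exact h ▸ h2 m (List.mem_cons_self ..)
        · rcases List.mem_cons.mp h with h' | h'
          · have := h2 m (List.mem_cons_self ..)
            omega
          · exact h2 y (List.mem_cons_of_mem _ h')

-- ===== VERDICT (by name: the statement is the Claim_ definition above) =====
theorem suma2mayores_spec : Claim_equal_suma2mayores := by
  intro n1 n2 n3 n4 _
  unfold Spec_suma2mayores suma2mayores suma2mayores_alt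
  dsimp only
  set L : List Int := [n1, n2, n3, n4] with hL
  -- name the sorted list
  have hperm : (PySem.List.sorted L (fun x => x) false).Perm L := PySem.List.sorted_perm ..
  have hpw : (PySem.List.sorted L (fun x => x) false).Pairwise (fun a b => a ≤ b) :=
    PySem.List.sorted_pairwise ..
  have hlen : (PySem.List.sorted L (fun x => x) false).length = 4 := by
    rw [hperm.length_eq]; rfl
  obtain ⟨a, b, c, d, hS⟩ : ∃ a b c d, PySem.List.sorted L (fun x => x) false = [a, b, c, d] := by
    match hSm : PySem.List.sorted L (fun x => x) false, hlen with
    | [a, b, c, d], _ => exact ⟨a, b, c, d, rfl⟩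
  rw [hS] at hperm hpw
  have hab : a ≤ b := by simp [List.pairwise_cons] at hpw; omega
  have hbc : b ≤ c := by simp [List.pairwise_cons] at hpw; omega
  have hcd : c ≤ d := by simp [List.pairwise_cons] at hpw; omega
  -- B side: the [-2:] slice of the sorted list is [c, d]
  have hB : (PySem.List.slice (PySem.List.sorted L (fun x => x) false) (some (-2)) none).sum
      = c + d := by
    rw [hS, PySem.List.slice_from_neg_ofNat _ 2 (by omega)]
    simp
  rw [hB]
  -- A side
  have hget : PySem.List.pyGetD L 0 0 = n1 := by rw [hL]; simp [PySem.List.pyGetD_zero_cons]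
  rw [hget]
  set max1 := L.foldl (fun m numero => if numero > m then numero else m) n1 with hmax1
  obtain ⟨hm1mem, hm1ub⟩ := foldMax_spec n1 L
  rw [← hmax1] at hm1mem hm1ub
  have hm1L : max1 ∈ L := by
    rcases List.mem_cons.mp hm1mem with h | h
    · rw [h]; simp [hL]
    · exact h
  -- max1 = d
  have hm1d : max1 = d := by
    have h1 : max1 ∈ ([a, b, c, d] : List Int) := hperm.mem_iff.mpr hm1L
    have h2 : d ∈ L := hperm.mem_iff.mp (by simp)
    have h3 : d ≤ max1 := hm1ub d (List.mem_cons_of_mem _ h2)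
    simp at h1
    omega
  rw [hm1d]
  have hdL : d ∈ L := hperm.mem_iff.mp (by simp)
  rw [PySem.List.remove?_eq_some_erase L d hdL, Option.getD_some]
  set E := L.erase d with hEdef
  have hEperm : E.Perm (([a, b, c, d] : List Int).erase d) := (hperm.erase d).symm
  have hElen : E.length = 3 := by
    rw [hEdef, List.length_erase_of_mem hdL]; rfl
  have hEne : E ≠ [] := by intro h; rw [h] at hElen; simp at hElen
  -- head of E is in E
  have hhead : E.getD 0 0 ∈ E := by
    match E, hEne with
    | x :: t, _ => simp
  obtain ⟨hm2mem, hm2ub⟩ := foldMax_spec (E.getD 0 0) E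
  set max2 := E.foldl (fun m numero => if numero > m then numero else m) (E.getD 0 0) with hmax2
  have hm2E : max2 ∈ E := by
    rcases List.mem_cons.mp hm2mem with h | h
    · rw [h]; exact hhead
    · exact h
  -- members of [a,b,c,d].erase d are ≤ c, and it contains an element ≥ c
  have hkey : (∀ y ∈ ([a, b, c, d] : List Int).erase d, y ≤ c) ∧
      (∃ x ∈ ([a, b, c, d] : List Int).erase d, c ≤ x) := by
    by_cases ha : a = d
    · have : ([a, b, c, d] : List Int).erase d = [b, c, d] := by
        simp [ha]
      rw [this]
      constructor
      · intro y hy; simp at hy; rcases hy with h | h | h <;> omega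
      · exact ⟨d, by simp, by omega⟩
    · by_cases hb : b = d
      · have : ([a, b, c, d] : List Int).erase d = [a, c, d] := by
          simp [ha, hb]
        rw [this]
        constructor
        · intro y hy; simp at hy; rcases hy with h | h | h <;> omega
        · exact ⟨d, by simp, by omega⟩
      · by_cases hc : c = d
        · have : ([a, b, c, d] : List Int).erase d = [a, b, d] := by
            simp [ha, hb, hc]
          rw [this]
          constructor
          · intro y hy; simp at hy; rcases hy with h | h | h <;> omega
          · exact ⟨d, by simp, by omega⟩
        · have : ([a, b, c, d] : List Int).erase d = [a, b, c] := by
            simp [ha, hb, hc]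
          rw [this]
          constructor
          · intro y hy; simp at hy; rcases hy with h | h | h <;> omega
          · exact ⟨c, by simp, by omega⟩
  have hm2c : max2 = c := by
    have hub : max2 ≤ c := hkey.1 max2 (hEperm.mem_iff.mp hm2E)
    obtain ⟨x, hxE, hcx⟩ := hkey.2
    have hxE' : x ∈ E := hEperm.mem_iff.mpr hxE
    have : x ≤ max2 := hm2ub x (List.mem_cons_of_mem _ hxE')
    omega
  rw [PySem.List.pyGetD_zero, ← hmax2, hm2c]
  omega
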